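-- pv_equiv track=rewrite | github.com/ejulianops/python | part07-17_string_helper/src/string_helper.py | split_in_half
-- ===== SOURCE A (Python) =====
-- import math
--
-- def split_in_half(orig_string: str):
--
--     string_halves = []
--
--     split_here = (len(orig_string) / 2) - 1
--     split_here = math.floor(split_here)
--
--     first_half = ''
--     second_half = ''
--
--     for character in orig_string:
--
--         if split_here >= 0:
--             first_half += character
--             split_here -= 1
--         else:
--             second_half += character
--             split_here
--     string_halves.append(first_half)
--     string_halves.append(second_half)
--
--     return tuple(string_halves)
-- ===== SOURCE B (Python) =====
-- def split_in_half(orig_string: str):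
--     mid = len(orig_string) // 2
--     return (orig_string[:mid], orig_string[mid:])
-- ===== Notes on version B (the rewrite author's own statement) =====
-- stated objective: idiomatic
-- what changed: Replaced the per-character countdown loop with string concatenation by a closed-form midpoint (len//2) and two slices.
import Mathlib
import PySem

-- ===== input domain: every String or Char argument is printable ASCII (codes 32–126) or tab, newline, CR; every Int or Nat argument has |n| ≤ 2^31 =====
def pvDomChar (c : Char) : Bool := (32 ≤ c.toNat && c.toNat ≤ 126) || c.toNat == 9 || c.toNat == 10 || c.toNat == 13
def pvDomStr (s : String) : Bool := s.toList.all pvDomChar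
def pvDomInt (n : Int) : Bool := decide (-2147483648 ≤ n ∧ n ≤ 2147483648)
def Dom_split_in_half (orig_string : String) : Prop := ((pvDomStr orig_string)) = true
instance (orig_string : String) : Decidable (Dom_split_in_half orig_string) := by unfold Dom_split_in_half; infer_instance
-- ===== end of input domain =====

-- B replaces A's per-character countdown loop by the closed-form midpoint len//2 and two slices.

-- ===== PORT A =====
-- state = (first_half, second_half, split_here); math.floor(len/2 - 1) = len//2 - 1 exactly on this domain
def split_in_half (orig_string : String) : String × String :=
  let split_here : Int := PySem.Int.floordiv (PySem.Str.len orig_string) 2 - 1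
  let st := orig_string.toList.foldl
    (fun (st : List Char × List Char × Int) c =>
      if st.2.2 ≥ 0 then (st.1 ++ [c], st.2.1, st.2.2 - 1)
      else (st.1, st.2.1 ++ [c], st.2.2))
    ([], [], split_here)
  (String.ofList st.1, String.ofList st.2.1)

-- ===== PORT B =====
def split_in_half_alt (orig_string : String) : String × String :=
  let mid : Int := PySem.Int.floordiv (PySem.Str.len orig_string) 2
  (String.ofList (PySem.List.slice orig_string.toList none (some mid)),
   String.ofList (PySem.List.slice orig_string.toList (some mid) none))

-- ===== PRECONDITION & SPEC =====
def Spec_split_in_half (orig_string : String) (out : String × String) : Prop := out = split_in_half_alt orig_string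
instance (orig_string : String) (out : String × String) : Decidable (Spec_split_in_half orig_string out) := by unfold Spec_split_in_half; infer_instance

-- ===== CLAIM (what is proved, stated in full; the proofs are below) =====
def Claim_equal_split_in_half : Prop := ∀ (orig_string : String), Dom_split_in_half orig_string → Spec_split_in_half orig_string (split_in_half orig_string)

-- ===== LEMMAS AND PROOFS =====

/-- A's loop splits the remaining list at position `(k+1).toNat`. -/
theorem split_loop_eq (l : List Char) : ∀ (f s2 : List Char) (k : Int),
    l.foldl
      (fun (st : List Char × List Char × Int) c =>
        if st.2.2 ≥ 0 then (st.1 ++ [c], st.2.1, st.2.2 - 1)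
        else (st.1, st.2.1 ++ [c], st.2.2))
      (f, s2, k)
    = (f ++ l.take (k + 1).toNat, s2 ++ l.drop (k + 1).toNat, k - (min (k + 1).toNat l.length : Nat)) := by
  induction l with
  | nil => intro f s2 k; simp
  | cons c l ih =>
    intro f s2 k
    by_cases hk : k ≥ 0
    · have ht : (k + 1).toNat = ((k - 1) + 1).toNat + 1 := by omega
      simp only [List.foldl_cons, if_pos hk, ih]
      rw [ht]
      simp only [List.take_succ_cons, List.drop_succ_cons, List.append_assoc, List.length_cons,
        Prod.mk.injEq]
      refine ⟨by simp, by simp, by omega⟩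
    · have ht : (k + 1).toNat = 0 := by omega
      simp only [List.foldl_cons, if_neg hk, ih, ht]
      simp only [List.take_zero, List.drop_zero, List.append_nil, List.length_cons,
        Prod.mk.injEq]
      refine ⟨by simp, by simp, by omega⟩

theorem split_in_half_eq_alt (orig_string : String) :
    split_in_half orig_string = split_in_half_alt orig_string := by
  unfold split_in_half split_in_half_alt
  have hlen : PySem.Str.len orig_string = (orig_string.toList.length : Int) := by
    simp [PySem.Str.len_eq]
  set l := orig_string.toList with hl
  have hmid : PySem.Int.floordiv (PySem.Str.len orig_string) 2 = ((l.length / 2 : Nat) : Int) := by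
    rw [hlen]
    simp
  simp only [split_loop_eq, List.nil_append, hmid]
  have h1 : ((l.length / 2 : Nat) : Int) - 1 + 1 = ((l.length / 2 : Nat) : Int) := by ring
  rw [h1]
  rw [PySem.List.slice_to_natCast, PySem.List.slice_from_natCast]
  norm_num
  refine ⟨by congr 1, by congr 1⟩

-- ===== VERDICT (by name: the statement is the Claim_ definition above) =====
theorem split_in_half_spec : Claim_equal_split_in_half := by
  intro s _
  unfold Spec_split_in_half
  exact split_in_half_eq_alt s
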